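-- pv_equiv track=rewrite | github.com/abhineetjain13/Crawlwise | backend/app/services/llm_tasks.py | _truncate_structured_lines
-- ===== SOURCE A (Python) =====
-- def _truncate_structured_lines(text: str, budget: int, placeholder: str) -> str:
--     lines = [line.rstrip() for line in text.splitlines() if line.strip()]
--     if not lines:
--         return ""
--     closing = ""
--     if text.startswith("{") and text.rstrip().endswith("}"):
--         closing = "}"
--     elif text.startswith("[") and text.rstrip().endswith("]"):
--         closing = "]"
--     suffix = f"\n{placeholder}{closing}" if closing else f"\n{placeholder}"
--     if len(lines[0]) + len(suffix) > budget:
--         return ""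
--     kept = [lines[0]]
--     used = len(lines[0])
--     for line in lines[1:]:
--         next_used = used + 1 + len(line)
--         if next_used + len(suffix) > budget:
--             break
--         kept.append(line)
--         used = next_used
--     if len(kept) == len(lines):
--         return "\n".join(kept)
--     return "\n".join(kept) + suffix
-- ===== SOURCE B (Python) =====
-- def _truncate_structured_lines(text: str, budget: int, placeholder: str) -> str:
--     lines = [line.rstrip() for line in text.splitlines() if line.strip()]
--     if not lines:
--         return ""
--     closing = ""
--     if text.startswith("{") and text.rstrip().endswith("}"):
--         closing = "}"
--     elif text.startswith("[") and text.rstrip().endswith("]"):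
--         closing = "]"
--     suffix = "\n" + placeholder + closing
--     # prefix-length table: cum[i] = len("\n".join(lines[:i+1]))
--     cum = []
--     total = -1
--     for line in lines:
--         total += 1 + len(line)
--         cum.append(total)
--     limit = budget - len(suffix)
--     # binary search (bisect_right): lo = number of prefixes fitting the budget
--     lo, hi = 0, len(cum)
--     while lo < hi:
--         mid = (lo + hi) // 2
--         if cum[mid] <= limit:
--             lo = mid + 1
--         else:
--             hi = mid
--     if lo == 0:
--         return ""
--     if lo == len(lines):
--         return "\n".join(lines)
--     return "\n".join(lines[:lo]) + suffix
-- ===== Notes on version B (the rewrite author's own statement) =====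
-- stated objective: alternative
-- what changed: Replaces A's incremental accumulate-and-break scan with a precomputed prefix-length table plus a hand-written bisect_right binary search over it, reconstructing the result from a slice.
import Mathlib
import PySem

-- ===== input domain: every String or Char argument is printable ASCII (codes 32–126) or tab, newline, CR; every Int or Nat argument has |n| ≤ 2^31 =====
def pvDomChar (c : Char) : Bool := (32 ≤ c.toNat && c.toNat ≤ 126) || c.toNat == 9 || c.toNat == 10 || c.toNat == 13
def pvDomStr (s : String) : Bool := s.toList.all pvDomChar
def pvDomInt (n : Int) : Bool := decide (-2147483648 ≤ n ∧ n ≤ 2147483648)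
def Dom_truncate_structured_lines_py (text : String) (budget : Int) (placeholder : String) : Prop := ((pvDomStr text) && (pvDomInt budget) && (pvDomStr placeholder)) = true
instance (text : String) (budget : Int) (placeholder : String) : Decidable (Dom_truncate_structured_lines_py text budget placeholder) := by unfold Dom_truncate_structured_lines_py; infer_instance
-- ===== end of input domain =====

-- B replaces A's accumulate-and-break scan with a prefix-length table plus a binary search over it
-- (objective: alternative decomposition, same asymptotic cost).

-- ===== PORT A =====
def pvLinesA (text : String) : List String :=
  ((PySem.Str.splitlines text).filter (fun l => PySem.Str.len (PySem.Str.strip l) != 0)).map PySem.Str.rstrip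

def pvClosingA (text : String) : String :=
  if PySem.Str.startswith text "{" && PySem.Str.endswith (PySem.Str.rstrip text) "}" then "}"
  else if PySem.Str.startswith text "[" && PySem.Str.endswith (PySem.Str.rstrip text) "]" then "]"
  else ""

def pvSuffixA (text placeholder : String) : String :=
  let closing := pvClosingA text
  if closing ≠ "" then "\n" ++ placeholder ++ closing else "\n" ++ placeholder

def pvKeptLoopA (budget sLen : Int) : List String → List String → Int → List String
  | [], kept, _ => kept
  | l :: rest, kept, used =>
    let next_used := used + 1 + PySem.Str.len l
    if next_used + sLen > budget then kept
    else pvKeptLoopA budget sLen rest (kept ++ [l]) next_used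

def truncate_structured_lines_py (text : String) (budget : Int) (placeholder : String) : String :=
  let lines := pvLinesA text
  if lines = [] then ""
  else
    let suffix := pvSuffixA text placeholder
    let first := PySem.List.pyGetD lines 0 ""
    if PySem.Str.len first + PySem.Str.len suffix > budget then ""
    else
      let kept := pvKeptLoopA budget (PySem.Str.len suffix) (PySem.List.slice lines (some 1) none) [first] (PySem.Str.len first)
      if kept.length = lines.length then PySem.Str.join "\n" kept
      else PySem.Str.join "\n" kept ++ suffix

-- ===== PORT B =====
def pvLinesB (text : String) : List String :=
  ((PySem.Str.splitlines text).filter (fun l => PySem.Str.len (PySem.Str.strip l) != 0)).map PySem.Str.rstrip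

def pvClosingB (text : String) : String :=
  if PySem.Str.startswith text "{" && PySem.Str.endswith (PySem.Str.rstrip text) "}" then "}"
  else if PySem.Str.startswith text "[" && PySem.Str.endswith (PySem.Str.rstrip text) "]" then "]"
  else ""

-- the prefix-length table: cum and total evolve together as in Source B's for-loop
def pvCumB (lines : List String) : List Int :=
  (lines.foldl (fun (st : List Int × Int) line =>
      (st.1 ++ [st.2 + 1 + PySem.Str.len line], st.2 + 1 + PySem.Str.len line))
    (([] : List Int), (-1 : Int))).1

-- Source B's hand-written while-loop binary search (bisect_right); ported with fuel = len(cum),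
-- which bounds the iteration count since hi - lo shrinks every round.  cum[mid] is ported as
-- pyGetD with default 0: mid always lies in range when the loop runs, so this is exact.
def pvBsB (cum : List Int) (limit : Int) : Nat → Int → Int → Int
  | 0, lo, _ => lo
  | fuel + 1, lo, hi =>
    if lo < hi then
      let mid := PySem.Int.floordiv (lo + hi) 2
      if PySem.List.pyGetD cum mid 0 ≤ limit then pvBsB cum limit fuel (mid + 1) hi
      else pvBsB cum limit fuel lo mid
    else lo

def truncate_structured_lines_py_alt (text : String) (budget : Int) (placeholder : String) : String :=
  let lines := pvLinesB text
  if lines = [] then ""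
  else
    let suffix := "\n" ++ placeholder ++ pvClosingB text
    let cum := pvCumB lines
    let limit := budget - PySem.Str.len suffix
    let lo := pvBsB cum limit cum.length 0 (PySem.List.len cum)
    if lo = 0 then ""
    else if lo = (lines.length : Int) then PySem.Str.join "\n" lines
    else PySem.Str.join "\n" (PySem.List.slice lines none (some lo)) ++ suffix

-- ===== PRECONDITION & SPEC =====
def Spec_truncate_structured_lines_py (text : String) (budget : Int) (placeholder : String) (out : String) : Prop := out = truncate_structured_lines_py_alt text budget placeholder
instance (text : String) (budget : Int) (placeholder : String) (out : String) : Decidable (Spec_truncate_structured_lines_py text budget placeholder out) := by unfold Spec_truncate_structured_lines_py; infer_instance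

-- ===== CLAIM (what is proved, stated in full; the proofs are below) =====
def Claim_equal_truncate_structured_lines_py : Prop := ∀ (text : String) (budget : Int) (placeholder : String), Dom_truncate_structured_lines_py text budget placeholder → Spec_truncate_structured_lines_py text budget placeholder (truncate_structured_lines_py text budget placeholder)

-- ===== LEMMAS AND PROOFS =====

-- proof-side recursion for B's cumulative table
def pvCumAux (t : Int) : List String → List Int
  | [] => []
  | l :: ls => (t + 1 + PySem.Str.len l) :: pvCumAux (t + 1 + PySem.Str.len l) ls

-- proof-side recursion for the lines A's loop keeps beyond the first
def pvTakeA (budget sLen : Int) (used : Int) : List String → List String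
  | [] => []
  | l :: ls =>
    if used + 1 + PySem.Str.len l + sLen > budget then []
    else l :: pvTakeA budget sLen (used + 1 + PySem.Str.len l) ls

theorem pvCumB_foldl (ls : List String) : ∀ (acc : List Int) (t : Int),
    (ls.foldl (fun (st : List Int × Int) line =>
      (st.1 ++ [st.2 + 1 + PySem.Str.len line], st.2 + 1 + PySem.Str.len line)) (acc, t)).1
    = acc ++ pvCumAux t ls := by
  induction ls with
  | nil => intro acc t; simp [pvCumAux]
  | cons l ls ih =>
      intro acc t
      simp only [List.foldl_cons, pvCumAux]
      rw [ih]
      simp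

theorem pvCumB_eq (lines : List String) : pvCumB lines = pvCumAux (-1) lines := by
  unfold pvCumB; rw [pvCumB_foldl]; simp

theorem pvCumAux_length (ls : List String) : ∀ t, (pvCumAux t ls).length = ls.length := by
  induction ls with
  | nil => intro t; simp [pvCumAux]
  | cons l ls ih => intro t; simp [pvCumAux, ih]

theorem pvCumAux_lt_mem (ls : List String) : ∀ t x, x ∈ pvCumAux t ls → t < x := by
  induction ls with
  | nil => intro t x hx; simp [pvCumAux] at hx
  | cons l ls ih =>
      intro t x hx
      simp only [pvCumAux, List.mem_cons] at hx
      have hl : (0:Int) ≤ PySem.Str.len l := by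
        rw [PySem.Str.len_eq]; positivity
      rcases hx with h | h
      · omega
      · have := ih _ _ h; omega

theorem pvKeptLoopA_eq (budget sLen : Int) (ls : List String) : ∀ (kept : List String) (used : Int),
    pvKeptLoopA budget sLen ls kept used = kept ++ pvTakeA budget sLen used ls := by
  induction ls with
  | nil => intro kept used; simp [pvKeptLoopA, pvTakeA]
  | cons l ls ih =>
      intro kept used
      simp only [pvKeptLoopA, pvTakeA]
      split
      · simp
      · rw [ih]; simp

theorem pvTakeA_prefix (budget sLen : Int) (ls : List String) : ∀ used,
    pvTakeA budget sLen used ls = ls.take (pvTakeA budget sLen used ls).length := by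
  induction ls with
  | nil => intro used; simp [pvTakeA]
  | cons l ls ih =>
      intro used
      simp only [pvTakeA]
      split
      · simp
      · simp only [List.length_cons, List.take_succ_cons]
        rw [← ih]

theorem pvTakeA_length_le (budget sLen : Int) (ls : List String) (used : Int) :
    (pvTakeA budget sLen used ls).length ≤ ls.length := by
  conv_lhs => rw [pvTakeA_prefix budget sLen ls used]
  simp

-- key correspondence: an entry of the cumulative table fits the budget iff A's loop keeps it
theorem pvTakeA_iff (budget sLen : Int) (ls : List String) : ∀ (used : Int) (i : Nat)
    (h : i < (pvCumAux used ls).length),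
    ((pvCumAux used ls)[i] ≤ budget - sLen ↔ i < (pvTakeA budget sLen used ls).length) := by
  induction ls with
  | nil => intro used i h; simp [pvCumAux] at h
  | cons l ls ih =>
      intro used i h
      simp only [pvCumAux, pvTakeA]
      match i with
      | 0 =>
          simp only [List.getElem_cons_zero]
          split
          · rename_i hc
            simp only [List.length_nil]
            omega
          · rename_i hc
            simp only [List.length_cons]
            omega
      | Nat.succ j =>
          simp only [List.getElem_cons_succ]
          split
          · rename_i hc
            simp only [List.length_nil]
            have hj : j < (pvCumAux (used + 1 + PySem.Str.len l) ls).length := by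
              simp only [pvCumAux, List.length_cons] at h; omega
            have hmem : (pvCumAux (used + 1 + PySem.Str.len l) ls)[j] ∈
                pvCumAux (used + 1 + PySem.Str.len l) ls := List.getElem_mem _
            have := pvCumAux_lt_mem ls (used + 1 + PySem.Str.len l) _ hmem
            omega
          · rename_i hc
            simp only [List.length_cons]
            have hj : j < (pvCumAux (used + 1 + PySem.Str.len l) ls).length := by
              simp only [pvCumAux, List.length_cons] at h; omega
            have := ih (used + 1 + PySem.Str.len l) j hj
            omega

-- the binary search returns any K that splits the table at the budget
theorem pvBsB_spec (cum : List Int) (limit K : Int)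
    (hK : ∀ (i : Nat) (h : i < cum.length), (cum[i] ≤ limit ↔ (i : Int) < K)) :
    ∀ (fuel : Nat) (lo hi : Int), 0 ≤ lo → hi ≤ (cum.length : Int) → lo ≤ K → K ≤ hi →
      hi - lo ≤ (fuel : Int) → pvBsB cum limit fuel lo hi = K := by
  intro fuel
  induction fuel with
  | zero =>
      intro lo hi h0 hlen hloK hKhi hfuel
      simp only [pvBsB]; omega
  | succ fuel ih =>
      intro lo hi h0 hlen hloK hKhi hfuel
      simp only [pvBsB]
      split
      · rename_i hlohi
        have hmid : PySem.Int.floordiv (lo + hi) 2 = (lo + hi) / 2 :=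
          PySem.Int.floordiv_eq_ediv_of_pos (by omega)
        rw [hmid]
        set mid := (lo + hi) / 2 with hmiddef
        have hb1 : lo ≤ mid := by omega
        have hb2 : mid < hi := by omega
        have hmidnat : mid.toNat < cum.length := by omega
        have hget : PySem.List.pyGetD cum mid 0 = cum[mid.toNat] := by
          have hmn : mid = ((mid.toNat : Nat) : Int) := by omega
          conv_lhs => rw [hmn]
          rw [PySem.List.pyGetD_natCast]
          simp [hmidnat]
        rw [hget]
        have hiff := hK mid.toNat hmidnat
        split
        · rename_i hle
          have : mid < K := by
            have := hiff.mp hle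
            omega
          exact ih (mid + 1) hi (by omega) hlen (by omega) hKhi (by omega)
        · rename_i hgt
          have : K ≤ mid := by
            by_contra hcon
            exact hgt (hiff.mpr (by omega))
          exact ih lo mid h0 (by omega) hloK (by omega) (by omega)
      · omega

theorem pvSuffixB_eq (text placeholder : String) :
    "\n" ++ placeholder ++ pvClosingB text = pvSuffixA text placeholder := by
  have hcb : pvClosingB text = pvClosingA text := rfl
  rw [hcb]
  unfold pvSuffixA
  by_cases hc : pvClosingA text = ""
  · simp [hc]
  · simp [hc]

-- ===== VERDICT (by name: the statement is the Claim_ definition above) =====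
theorem truncate_structured_lines_py_spec : Claim_equal_truncate_structured_lines_py := by
  intro text budget placeholder _
  unfold Spec_truncate_structured_lines_py
  unfold truncate_structured_lines_py truncate_structured_lines_py_alt
  have hlb : pvLinesB text = pvLinesA text := rfl
  rw [hlb, pvSuffixB_eq]
  cases hL : pvLinesA text with
  | nil => simp
  | cons l0 rest =>
      simp only [List.cons_ne_nil, ite_false]
      set suffix := pvSuffixA text placeholder with hsuf
      set S := PySem.Str.len suffix with hS
      have hfirst : PySem.List.pyGetD (l0 :: rest) (0 : Int) "" = l0 := by
        rw [show ((0:Int) = ((0:Nat):Int)) from rfl, PySem.List.pyGetD_natCast]; simp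
      have htail : PySem.List.slice (l0 :: rest) (some 1) none = rest :=
        PySem.List.slice_from_one _
      rw [hfirst, htail]
      have hl0 : (0:Int) ≤ PySem.Str.len l0 := by rw [PySem.Str.len_eq]; positivity
      -- the cumulative table
      have hcum : pvCumB (l0 :: rest) = PySem.Str.len l0 :: pvCumAux (PySem.Str.len l0) rest := by
        rw [pvCumB_eq]
        simp only [pvCumAux]
        norm_num
      set k : Nat := (pvTakeA budget S (PySem.Str.len l0) rest).length with hk
      have hkle : k ≤ rest.length := pvTakeA_length_le budget S rest (PySem.Str.len l0)
      have hcumlen : (pvCumB (l0 :: rest)).length = rest.length + 1 := by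
        rw [hcum]; simp [pvCumAux_length]
      -- the split point K
      set K : Int := if PySem.Str.len l0 + S > budget then 0 else 1 + (k : Int) with hKdef
      have hKiff : ∀ (i : Nat) (h : i < (pvCumB (l0 :: rest)).length),
          ((pvCumB (l0 :: rest))[i] ≤ budget - S ↔ (i : Int) < K) := by
        intro i hi
        rw [hKdef]
        by_cases hc0 : PySem.Str.len l0 + S > budget
        · simp only [if_pos hc0]
          constructor
          · intro hle
            exfalso
            match i, hi with
            | 0, _ =>
                simp only [hcum] at hle
                simp only [List.getElem_cons_zero] at hle
                omega
            | Nat.succ j, hi =>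
                simp only [hcum] at hle hi ⊢
                simp only [List.getElem_cons_succ] at hle
                simp only [List.length_cons] at hi
                have hmem : (pvCumAux (PySem.Str.len l0) rest)[j]'(by
                    have := pvCumAux_length rest (PySem.Str.len l0); omega) ∈
                    pvCumAux (PySem.Str.len l0) rest := List.getElem_mem _
                have := pvCumAux_lt_mem rest (PySem.Str.len l0) _ hmem
                omega
          · intro hlt; omega
        · simp only [if_neg hc0]
          match i, hi with
          | 0, _ =>
              simp only [hcum, List.getElem_cons_zero]
              constructor
              · intro _; omega
              · intro _; omega
          | Nat.succ j, hi =>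
              simp only [hcum] at hi ⊢
              simp only [List.getElem_cons_succ, List.length_cons] at hi ⊢
              have hj : j < (pvCumAux (PySem.Str.len l0) rest).length := by
                have := pvCumAux_length rest (PySem.Str.len l0); omega
              have := pvTakeA_iff budget S rest (PySem.Str.len l0) j hj
              rw [← hk] at this
              constructor
              · intro hle
                have := this.mp hle
                omega
              · intro hlt
                exact this.mpr (by omega)
      have hbs : pvBsB (pvCumB (l0 :: rest)) (budget - S) (pvCumB (l0 :: rest)).length 0
          (PySem.List.len (pvCumB (l0 :: rest))) = K := by
        rw [PySem.List.len_eq]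
        apply pvBsB_spec _ _ _ hKiff
        · omega
        · omega
        · rw [hKdef]; split <;> omega
        · rw [hKdef]; split
          · omega
          · rw [hcumlen]; push_cast; omega
        · omega
      rw [hbs]
      by_cases hc0 : PySem.Str.len l0 + S > budget
      · simp only [if_pos hc0]
        have : K = 0 := by rw [hKdef, if_pos hc0]
        rw [this]
        simp
      · simp only [if_neg hc0]
        have hKval : K = 1 + (k : Int) := by rw [hKdef, if_neg hc0]
        have hKne : ¬ K = 0 := by omega
        rw [if_neg hKne]
        rw [pvKeptLoopA_eq]
        have hkept : (l0 :: pvTakeA budget S (PySem.Str.len l0) rest) =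
            (l0 :: rest).take (k + 1) := by
          simp only [List.take_succ_cons]
          congr 1
          rw [hk]
          exact pvTakeA_prefix budget S rest (PySem.Str.len l0)
        by_cases hfull : K = ((l0 :: rest).length : Int)
        · rw [if_pos hfull]
          have hkfull : k = rest.length := by
            simp only [List.length_cons] at hfull; omega
          have : ([l0] ++ pvTakeA budget S (PySem.Str.len l0) rest) = l0 :: rest := by
            simp only [List.singleton_append]
            rw [hkept, hkfull]
            simp
          rw [this]
          exact if_pos rfl
        · rw [if_neg hfull]
          have hlen : ¬ ([l0] ++ pvTakeA budget S (PySem.Str.len l0) rest).length =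
              (l0 :: rest).length := by
            intro hcon
            apply hfull
            rw [hKval]
            simp only [List.singleton_append, List.length_cons] at hcon ⊢
            omega
          rw [if_neg hlen]
          have hslice : PySem.List.slice (l0 :: rest) none (some K) =
              (l0 :: rest).take K.toNat := PySem.List.slice_to _ (by omega)
          rw [hslice]
          have hKt : K.toNat = k + 1 := by omega
          rw [hKt, ← hkept]
          simp only [List.singleton_append]
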